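/- GENERATED by c/gen_decode.py: decode facts of the image, one per distinct instruction byte string. -/
import UserX.DecodeImage

#decode_all Vorbis.Dec
  "0f28c2"  -- movaps xmm0,xmm2
  "0f843cffffff"  -- je 112f1e
  "0f84e9010000"  -- je 1133c3
  "0f8807fdffff"  -- js 110c7f
  "0f8efffeffff"  -- jle 110c92
  "0fb6842b46030000"  -- movzx eax,BYTE PTR [rbx+rbp*1+0x346]
  "395c2404"  -- cmp DWORD PTR [rsp+0x4],ebx
  "410fafec"  -- imul ebp,r12d
  "4139de"  -- cmp r14d,ebx
  "418817"  -- mov BYTE PTR [r15],dl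
  "418b442408"  -- mov eax,DWORD PTR [r12+0x8]
  "41c686d506000000"  -- mov BYTE PTR [r14+0x6d5],0x0
  "42c684344001000001"  -- mov BYTE PTR [rsp+r14*1+0x140],0x1
  "4439a3e8060000"  -- cmp DWORD PTR [rbx+0x6e8],r12d
  "44896c244c"  -- mov DWORD PTR [rsp+0x4c],r13d
  "4489ed"  -- mov ebp,r13d
  "448ba384000000"  -- mov r12d,DWORD PTR [rbx+0x84]
  "4529ef"  -- sub r15d,r13d
  "4589fe"  -- mov r14d,r15d
  "4801db"  -- add rbx,rbx
  "48635c2418"  -- movsxd rbx,DWORD PTR [rsp+0x18]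
  "4881fb08151200"  -- cmp rbx,0x121508
  "48890c24"  -- mov QWORD PTR [rsp],rcx
  "4889d5"  -- mov rbp,rdx
  "488b7318"  -- mov rsi,QWORD PTR [rbx+0x18]
  "488d1c46"  -- lea rbx,[rsi+rax*2]
  "488d7b14"  -- lea rdi,[rbx+0x14]
  "488d7f40"  -- lea rdi,[rdi+0x40]
  "488dbbe8060000"  -- lea rdi,[rbx+0x6e8]
  "488dbfe8060000"  -- lea rdi,[rdi+0x6e8]
  "48c7842488000000e00b1200"  -- mov QWORD PTR [rsp+0x88],0x120be0
  "4963dc"  -- movsxd rbx,r12d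
  "4989f6"  -- mov r14,rsi
  "498d7c5d02"  -- lea rdi,[r13+rbx*2+0x2]
  "498dbf38060000"  -- lea rdi,[r15+0x638]
  "4a8dbc3cc0000000"  -- lea rdi,[rsp+r15*1+0xc0]
  "4c63642418"  -- movsxd r12,DWORD PTR [rsp+0x18]
  "4c89e2"  -- mov rdx,r12
  "4c8bb3a8000000"  -- mov r14,QWORD PTR [rbx+0xa8]
  "4c8dbb8c000000"  -- lea r15,[rbx+0x8c]
  "4d8d3c46"  -- lea r15,[r14+rax*2]
  "660f2eca"  -- ucomisd xmm1,xmm2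
  "66410f6ef7"  -- movd xmm6,r15d
  "6689442418"  -- mov WORD PTR [rsp+0x18],ax
  "7427"  -- je 10f0a6
  "7515"  -- jne 10e442
  "780d"  -- js 10867e
  "7e24"  -- jle 107f59
  "803bff"  -- cmp BYTE PTR [rbx],0xff
  "83bd60ffffff00"  -- cmp DWORD PTR [rbp-0xa0],0x0
  "890424"  -- mov DWORD PTR [rsp],eax
  "897d90"  -- mov DWORD PTR [rbp-0x70],edi
  "89f9"  -- mov ecx,edi
  "8b5dbc"  -- mov ebx,DWORD PTR [rbp-0x44]
  "8b9d40080000"  -- mov ebx,DWORD PTR [rbp+0x840]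
  "ba00000000"  -- mov edx,0x0
  "c1fb02"  -- sar ebx,0x2
  "c78300070000ffffffff"  -- mov DWORD PTR [rbx+0x700],0xffffffff
  "e800dcfeff"  -- call 103d00
  "e80ab4ffff"  -- call 100640
  "e814ffffff"  -- call 104c60
  "e81dc9feff"  -- call 1008e0
  "e828bbfeff"  -- call 100720
  "e8308effff"  -- call 100800
  "e83b27ffff"  -- call 100640
  "e846fbfeff"  -- call 103d00
  "e8518effff"  -- call 100800
  "e85c28ffff"  -- call 108f20
  "e86a01ffff"  -- call 103d00
  "e87572ffff"  -- call 10d1c0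
  "e87fd3feff"  -- call 100720
  "e88b27ffff"  -- call 100640
  "e894cafeff"  -- call 101520
  "e89f1dffff"  -- call 100640
  "e8a96fffff"  -- call 102dc0
  "e8b30cffff"  -- call 104e20
  "e8bdaeffff"  -- call 100640
  "e8c86dffff"  -- call 10d1c0
  "e8d0f9ffff"  -- call 101300
  "e8db51ffff"  -- call 100640
  "e8e531ffff"  -- call 100800
  "e8ed78ffff"  -- call 100300
  "e8f86cffff"  -- call 100800
  "e910010000"  -- jmp 11409e
  "e95affffff"  -- jmp 10dcc6
  "e9a8feffff"  -- jmp 10f361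
  "e9fbf6ffff"  -- jmp 113b22
  "eb90"  -- jmp 1154ee
  "ebeb"  -- jmp 10482b
  "f20f58d0"  -- addsd xmm2,xmm0
  "f20f5e1d87da0100"  -- divsd xmm3,QWORD PTR [rip+0x1da87]
  "f30f1055a0"  -- movss xmm2,DWORD PTR [rbp-0x60]
  "f30f107bf0"  -- movss xmm7,DWORD PTR [rbx-0x10]
  "f30f1154241c"  -- movss DWORD PTR [rsp+0x1c],xmm2
  "f30f117c2414"  -- movss DWORD PTR [rsp+0x14],xmm7
  "f30f58f8"  -- addss xmm7,xmm0
  "f30f5c43ec"  -- subss xmm0,DWORD PTR [rbx-0x14]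
  "f3410f104508"  -- movss xmm0,DWORD PTR [r13+0x8]
  "f3420f5904bd80061200"  -- mulss xmm0,DWORD PTR [r15*4+0x120680]
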